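-- pv_equiv track=rewrite | github.com/KCony/FarmersMarkets | grid_class.py | build_grid
-- ===== SOURCE A (Python) =====
-- def build_grid(combinations, first_sq_points, row_len):
--     grid = {}
--     c = 1
--
--     def filler(sq_name, points, c):
--         try:
--             fin_point = combinations[points[0]], combinations[points[3]]
--             grid.setdefault(sq_name, []).extend(fin_point)
--
--             if points[3] + 1 < len(combinations):
--                 new_sq_name = 'square' + str(c)
--                 new_points = [i + 1 for i in points]
--                 filler(new_sq_name, new_points, c + 1)
--         except IndexError:
--             pass
--
--     filler('square0', first_sq_points, c)
--
--     del_list = [i for i in range(row_len, len(grid), row_len)]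
--     for i in del_list:
--         del grid['square' + str(i)]
--
--     return grid
-- ===== SOURCE B (Python) =====
-- def build_grid(combinations, first_sq_points, row_len):
--     grid = {}
--     if len(first_sq_points) >= 4:
--         p0, p3 = first_sq_points[0], first_sq_points[3]
--         k = 0
--         while True:
--             try:
--                 pair = combinations[p0 + k], combinations[p3 + k]
--             except IndexError:
--                 break
--             grid['square' + str(k)] = list(pair)
--             if p3 + k + 1 >= len(combinations):
--                 break
--             k += 1
--     for i in range(row_len, len(grid), row_len):
--         del grid['square' + str(i)]
--     return grid
-- ===== Notes on version B (the rewrite author's own statement) =====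
-- stated objective: simpler
-- what changed: Replaces the recursive closure filler (which threads a points list, a name counter and a mutated enclosing dict through one recursion level per square) with a plain while loop over a single integer offset k that assigns each square directly; Pre_ excludes only row_len = 0, on which A raises ValueError (range step 0).
import Mathlib
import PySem

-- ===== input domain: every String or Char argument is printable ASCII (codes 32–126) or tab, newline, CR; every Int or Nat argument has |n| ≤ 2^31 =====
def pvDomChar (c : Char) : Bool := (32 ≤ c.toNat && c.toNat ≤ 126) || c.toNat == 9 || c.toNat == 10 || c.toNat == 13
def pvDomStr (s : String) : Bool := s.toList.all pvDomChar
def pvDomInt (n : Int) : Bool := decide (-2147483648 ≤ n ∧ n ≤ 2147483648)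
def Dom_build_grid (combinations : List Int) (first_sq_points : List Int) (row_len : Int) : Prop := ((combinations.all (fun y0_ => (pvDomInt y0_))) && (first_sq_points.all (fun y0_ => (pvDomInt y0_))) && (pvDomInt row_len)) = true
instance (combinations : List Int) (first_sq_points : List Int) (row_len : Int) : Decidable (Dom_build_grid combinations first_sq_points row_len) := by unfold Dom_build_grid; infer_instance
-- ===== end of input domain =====

-- B replaces A's recursive closure (points list + name counter + mutated enclosing dict)
-- by a plain while loop over one integer offset; objective: simpler.

-- ===== PORT A =====
-- the nested recursive `filler`; the Nat fuel (2*len+2 at the call site) only bounds the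
-- recursion depth, which Python bounds by the IndexError / the points[3]+1 guard themselves
def build_grid_filler (combinations : List Int) : Nat → String → List Int → Int → PySem.Dict String (List Int) → PySem.Dict String (List Int)
  | 0, _, _, _, grid => grid
  | fuel+1, sq_name, points, c, grid =>
    -- try: fin_point = combinations[points[0]], combinations[points[3]]  (IndexError → grid unchanged)
    match PySem.List.pyGet? points 0 with
    | none => grid
    | some i0 =>
      match PySem.List.pyGet? combinations i0 with
      | none => grid
      | some v0 =>
        match PySem.List.pyGet? points 3 with
        | none => grid
        | some i3 =>
          match PySem.List.pyGet? combinations i3 with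
          | none => grid
          | some v3 =>
            -- grid.setdefault(sq_name, []).extend(fin_point)  =  grid[sq_name] = grid.get(sq_name, []) + [v0, v3]
            if i3 + 1 < PySem.List.len combinations then
              build_grid_filler combinations fuel ("square" ++ PySem.Int.toStr c) (points.map (fun i => i + 1)) (c + 1)
                (grid.modify sq_name [] (fun l => l ++ [v0, v3]))
            else grid.modify sq_name [] (fun l => l ++ [v0, v3])

def build_grid (combinations : List Int) (first_sq_points : List Int) (row_len : Int) : List (String × List Int) :=
  ((PySem.List.pyRange row_len ((PySem.Dict.size (build_grid_filler combinations (2 * combinations.length + 2) "square0" first_sq_points 1 PySem.Dict.empty) : Int)) row_len).foldl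
      (fun g i => g.erase ("square" ++ PySem.Int.toStr i))
      (build_grid_filler combinations (2 * combinations.length + 2) "square0" first_sq_points 1 PySem.Dict.empty)).items

-- ===== PORT B =====
-- the while-loop of Source B: one integer offset k, direct assignment grid['square'+str(k)];
-- the try/except IndexError is the `none` branch of pyGet?; the fuel only bounds the loop
def build_grid_alt_loop (combinations : List Int) (p0 p3 : Int) : Nat → Int → PySem.Dict String (List Int) → PySem.Dict String (List Int)
  | 0, _, grid => grid
  | fuel+1, k, grid =>
    match PySem.List.pyGet? combinations (p0 + k), PySem.List.pyGet? combinations (p3 + k) with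
    | some v0, some v3 =>
      if p3 + k + 1 ≥ PySem.List.len combinations then
        grid.insert ("square" ++ PySem.Int.toStr k) [v0, v3]
      else
        build_grid_alt_loop combinations p0 p3 fuel (k + 1) (grid.insert ("square" ++ PySem.Int.toStr k) [v0, v3])
    | _, _ => grid

def build_grid_alt (combinations : List Int) (first_sq_points : List Int) (row_len : Int) : List (String × List Int) :=
  let grid :=
    if PySem.List.len first_sq_points ≥ 4 then
      build_grid_alt_loop combinations (PySem.List.pyGetD first_sq_points 0 0) (PySem.List.pyGetD first_sq_points 3 0)
        (2 * combinations.length + 2) 0 PySem.Dict.empty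
    else PySem.Dict.empty
  ((PySem.List.pyRange row_len ((PySem.Dict.size grid : Int)) row_len).foldl
      (fun g i => g.erase ("square" ++ PySem.Int.toStr i)) grid).items

-- ===== PRECONDITION & SPEC =====
-- Pre_ excludes exactly row_len = 0, on which both Pythons raise ValueError (range() arg 3 must not be zero).
def Pre_build_grid (combinations : List Int) (first_sq_points : List Int) (row_len : Int) : Prop := row_len ≠ 0
instance (combinations : List Int) (first_sq_points : List Int) (row_len : Int) : Decidable (Pre_build_grid combinations first_sq_points row_len) := by unfold Pre_build_grid; infer_instance
def pvWitness_build_grid : List Int × List Int × Int := ([1, 2, 3, 4, 5, 6], [0, 1, 2, 3], 2)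

def Spec_build_grid (combinations : List Int) (first_sq_points : List Int) (row_len : Int) (out : List (String × List Int)) : Prop := out = build_grid_alt combinations first_sq_points row_len
instance (combinations : List Int) (first_sq_points : List Int) (row_len : Int) (out : List (String × List Int)) : Decidable (Spec_build_grid combinations first_sq_points row_len out) := by unfold Spec_build_grid; infer_instance

-- ===== CLAIM (what is proved, stated in full; the proofs are below) =====
def Claim_equal_build_grid : Prop := ∀ (combinations : List Int) (first_sq_points : List Int) (row_len : Int), Dom_build_grid combinations first_sq_points row_len → Pre_build_grid combinations first_sq_points row_len → Spec_build_grid combinations first_sq_points row_len (build_grid combinations first_sq_points row_len)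

-- ===== LEMMAS AND PROOFS =====

-- ---- injectivity of str(n): Nat.toDigits 10 structure ----

theorem toDigitsCore_eq_toDigits :
    ∀ n : Nat, ∀ (fuel : Nat) (ds : List Char), n < fuel →
      Nat.toDigitsCore 10 fuel n ds = Nat.toDigits 10 n ++ ds := by
  intro n
  induction n using Nat.strong_induction_on with
  | _ n ih =>
    intro fuel ds hlt
    obtain ⟨f, rfl⟩ : ∃ f, fuel = f + 1 := ⟨fuel - 1, by omega⟩
    rw [Nat.toDigitsCore]
    by_cases h10 : n / 10 = 0
    · rw [if_pos h10, Nat.toDigits, Nat.toDigitsCore, if_pos h10]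
      rfl
    · have hge : 10 ≤ n := by
        rcases Nat.lt_or_ge n 10 with h | h
        · exact absurd (Nat.div_eq_of_lt h) h10
        · exact h
      have hdivlt : n / 10 < n := Nat.div_lt_self (by omega) (by omega)
      rw [if_neg h10]
      rw [ih (n / 10) hdivlt f _ (by omega)]
      conv_rhs => rw [Nat.toDigits, Nat.toDigitsCore, if_neg h10,
        ih (n / 10) hdivlt n _ (by omega)]
      simp

theorem toDigits_small {n : Nat} (h : n < 10) : Nat.toDigits 10 n = [Nat.digitChar n] := by
  rw [Nat.toDigits, Nat.toDigitsCore, if_pos (Nat.div_eq_of_lt h), Nat.mod_eq_of_lt h]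

theorem toDigits_large {n : Nat} (h : 10 ≤ n) :
    Nat.toDigits 10 n = Nat.toDigits 10 (n / 10) ++ [Nat.digitChar (n % 10)] := by
  have h10 : ¬ n / 10 = 0 := by omega
  rw [Nat.toDigits, Nat.toDigitsCore, if_neg h10,
    toDigitsCore_eq_toDigits (n / 10) n _ (Nat.div_lt_self (by omega) (by omega))]

theorem toDigits_ne_nil (n : Nat) : Nat.toDigits 10 n ≠ [] := by
  by_cases h : n < 10
  · rw [toDigits_small h]; simp
  · rw [toDigits_large (by omega)]; simp

theorem toDigits_mem (n : Nat) : ∀ c ∈ Nat.toDigits 10 n, ∃ d, d < 10 ∧ c = Nat.digitChar d := by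
  induction n using Nat.strong_induction_on with
  | _ n ih =>
    by_cases h : n < 10
    · rw [toDigits_small h]; intro c hc; simp at hc; exact ⟨n, h, hc⟩
    · rw [toDigits_large (by omega)]
      intro c hc
      rcases List.mem_append.mp hc with hm | hm
      · exact ih (n / 10) (Nat.div_lt_self (by omega) (by omega)) c hm
      · simp at hm; exact ⟨n % 10, by omega, hm⟩

set_option maxHeartbeats 1000000 in
theorem digitChar_ne_dash : ∀ d < 10, Nat.digitChar d ≠ '-' := by decide

set_option maxHeartbeats 1000000 in
theorem digitChar_inj_lt : ∀ a < 10, ∀ b < 10, Nat.digitChar a = Nat.digitChar b → a = b := by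
  decide

theorem toDigits_inj : ∀ m n : Nat, Nat.toDigits 10 m = Nat.toDigits 10 n → m = n := by
  intro m
  induction m using Nat.strong_induction_on with
  | _ m ih =>
    intro n h
    by_cases hm : m < 10 <;> by_cases hn : n < 10
    · rw [toDigits_small hm, toDigits_small hn] at h
      simp at h
      exact digitChar_inj_lt m hm n hn h
    · exfalso
      rw [toDigits_small hm, toDigits_large (n := n) (by omega)] at h
      cases hh : Nat.toDigits 10 (n / 10) with
      | nil => exact toDigits_ne_nil _ hh
      | cons a t =>
        rw [hh] at h
        simp at h
    · exfalso
      rw [toDigits_large (n := m) (by omega), toDigits_small hn] at h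
      cases hh : Nat.toDigits 10 (m / 10) with
      | nil => exact toDigits_ne_nil _ hh
      | cons a t =>
        rw [hh] at h
        simp at h
    · rw [toDigits_large (n := m) (by omega), toDigits_large (n := n) (by omega)] at h
      have h2 := List.append_inj' h (by simp)
      have e1 : m / 10 = n / 10 :=
        ih (m / 10) (Nat.div_lt_self (by omega) (by omega)) (n / 10) h2.1
      have e2 : m % 10 = n % 10 := by
        have h3 := h2.2
        simp at h3
        exact digitChar_inj_lt (m % 10) (by omega) (n % 10) (by omega) h3
      omega

theorem toChars_inj (a b : Int) (h : PySem.Int.toChars a = PySem.Int.toChars b) : a = b := by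
  unfold PySem.Int.toChars at h
  split_ifs at h with ha hb hb
  · simp at h
    have := toDigits_inj _ _ h
    omega
  · exfalso
    cases hh : Nat.toDigits 10 b.toNat with
    | nil => exact toDigits_ne_nil _ hh
    | cons c t =>
      rw [hh] at h
      obtain ⟨d, hdlt, hd⟩ := toDigits_mem b.toNat c (by rw [hh]; simp)
      have hc : '-' = c := by injection h
      exact digitChar_ne_dash d hdlt (by rw [← hd, ← hc])
  · exfalso
    cases hh : Nat.toDigits 10 a.toNat with
    | nil => exact toDigits_ne_nil _ hh
    | cons c t =>
      rw [hh] at h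
      obtain ⟨d, hdlt, hd⟩ := toDigits_mem a.toNat c (by rw [hh]; simp)
      have hc : c = '-' := by injection h
      exact digitChar_ne_dash d hdlt (by rw [← hd, hc])
  · have := toDigits_inj _ _ h
    omega

theorem toStr_inj (a b : Int) (h : PySem.Int.toStr a = PySem.Int.toStr b) : a = b := by
  apply toChars_inj
  rw [← PySem.Int.toList_toStr, ← PySem.Int.toList_toStr, h]

-- the square names
def pvNm (i : Int) : String := "square" ++ PySem.Int.toStr i

theorem pvNm_def (i : Int) : "square" ++ PySem.Int.toStr i = pvNm i := rfl

theorem pvNm_inj (i j : Int) (h : pvNm i = pvNm j) : i = j := by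
  unfold pvNm at h
  exact toStr_inj _ _ ((String.append_right_inj _).mp h)

-- ---- the common abstraction of A's recursion and B's loop: the squares from offset k on ----
def pvGen (combs : List Int) (p0 p3 : Int) : Nat → Int → List (Int × List Int)
  | 0, _ => []
  | fuel+1, k =>
    match PySem.List.pyGet? combs (p0 + k), PySem.List.pyGet? combs (p3 + k) with
    | some v0, some v3 =>
      (k, [v0, v3]) :: (if p3 + k + 1 < PySem.List.len combs then pvGen combs p0 p3 fuel (k + 1) else [])
    | _, _ => []

theorem pyGet?_map {α β : Type} (f : α → β) (l : List α) (i : Int) :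
    PySem.List.pyGet? (l.map f) i = (PySem.List.pyGet? l i).map f := by
  simp only [PySem.List.pyGet?, List.length_map]
  cases PySem.List.pyIdx? l.length i with
  | none => rfl
  | some k => simp

theorem pyGet?_isSome_iff {α : Type} (xs : List α) (i : Int) :
    (PySem.List.pyGet? xs i).isSome ↔ (-(xs.length : Int) ≤ i ∧ i < xs.length) := by
  simp only [PySem.List.pyGet?, PySem.List.pyIdx?]
  split_ifs with h1 h2 h3 <;> simp <;> omega

theorem pyGet?_eq_some_getD {α : Type} (xs : List α) (i : Int) (d : α)
    (h1 : -(xs.length : Int) ≤ i) (h2 : i < xs.length) :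
    PySem.List.pyGet? xs i = some (PySem.List.pyGetD xs i d) := by
  obtain ⟨v, hv⟩ := Option.isSome_iff_exists.mp ((pyGet?_isSome_iff xs i).mpr ⟨h1, h2⟩)
  rw [hv, PySem.List.pyGetD, hv]
  rfl

theorem pyGet?_eq_none {α : Type} (xs : List α) (i : Int)
    (h : ¬ (-(xs.length : Int) ≤ i ∧ i < xs.length)) :
    PySem.List.pyGet? xs i = none := by
  cases hv : PySem.List.pyGet? xs i with
  | none => rfl
  | some v => exact absurd ((pyGet?_isSome_iff xs i).mp (by rw [hv]; rfl)) h

-- A's recursion, characterized: it appends the generated squares to the dict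
theorem filler_items (combs : List Int) (p0 p3 : Int) :
    ∀ (fuel : Nat) (k : Int) (q : List Int) (grid : PySem.Dict String (List Int)),
      PySem.List.pyGet? q 0 = some (p0 + k) →
      PySem.List.pyGet? q 3 = some (p3 + k) →
      (∀ j : Int, k ≤ j → grid.contains (pvNm j) = false) →
      (build_grid_filler combs fuel (pvNm k) q (k + 1) grid).items
        = grid.items ++ (pvGen combs p0 p3 fuel k).map (fun kv => (pvNm kv.1, kv.2)) := by
  intro fuel
  induction fuel with
  | zero => intro k q grid _ _ _; simp [build_grid_filler, pvGen]
  | succ f ihf =>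
    intro k q grid h0 h3 hfresh
    rw [build_grid_filler, pvGen]
    simp only [h0, h3]
    cases hv0 : PySem.List.pyGet? combs (p0 + k) with
    | none => simp [hv0]
    | some v0 =>
      cases hv3 : PySem.List.pyGet? combs (p3 + k) with
      | none => simp [hv0, hv3]
      | some v3 =>
        simp only [hv0, hv3]
        have hnc : grid.contains (pvNm k) = false := hfresh k le_rfl
        have hmod : (grid.modify (pvNm k) [] (fun l => l ++ [v0, v3])) =
            grid.insert (pvNm k) [v0, v3] := by
          rw [PySem.Dict.modify, PySem.Dict.getD_of_not_contains _ _ hnc]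
          simp
        have hins : (grid.insert (pvNm k) [v0, v3]).items = grid.items ++ [(pvNm k, [v0, v3])] :=
          PySem.Dict.items_insert_of_not_contains _ _ hnc
        by_cases hg : p3 + k + 1 < PySem.List.len combs
        · rw [if_pos hg, if_pos hg, hmod]
          have hq0 : PySem.List.pyGet? (q.map (fun i => i + 1)) 0 = some (p0 + (k + 1)) := by
            rw [pyGet?_map, h0]
            simp only [Option.map_some, Option.some.injEq]
            ring
          have hq3 : PySem.List.pyGet? (q.map (fun i => i + 1)) 3 = some (p3 + (k + 1)) := by
            rw [pyGet?_map, h3]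
            simp only [Option.map_some, Option.some.injEq]
            ring
          have hfresh' : ∀ j : Int, k + 1 ≤ j →
              (grid.insert (pvNm k) [v0, v3]).contains (pvNm j) = false := by
            intro j hj
            rw [PySem.Dict.contains_insert]
            have hne : (pvNm j == pvNm k) = false := by
              simp only [beq_eq_false_iff_ne, ne_eq]
              intro hc
              have := pvNm_inj _ _ hc
              omega
            rw [hne, hfresh j (by omega)]
            rfl
          rw [pvNm_def,
            ihf (k + 1) (q.map (fun i => i + 1)) (grid.insert (pvNm k) [v0, v3]) hq0 hq3 hfresh',
            hins]
          simp
        · rw [if_neg hg, if_neg hg, hmod, hins]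
          simp

-- B's loop, characterized: it appends the generated squares to the dict
theorem alt_loop_items (combs : List Int) (p0 p3 : Int) :
    ∀ (fuel : Nat) (k : Int) (grid : PySem.Dict String (List Int)),
      (∀ j : Int, k ≤ j → grid.contains (pvNm j) = false) →
      (build_grid_alt_loop combs p0 p3 fuel k grid).items
        = grid.items ++ (pvGen combs p0 p3 fuel k).map (fun kv => (pvNm kv.1, kv.2)) := by
  intro fuel
  induction fuel with
  | zero => intro k grid _; simp [build_grid_alt_loop, pvGen]
  | succ f ihf =>
    intro k grid hfresh
    rw [build_grid_alt_loop, pvGen]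
    cases hv0 : PySem.List.pyGet? combs (p0 + k) with
    | none => simp [hv0]
    | some v0 =>
      cases hv3 : PySem.List.pyGet? combs (p3 + k) with
      | none => simp [hv0, hv3]
      | some v3 =>
        simp only [hv0, hv3]
        have hnc : grid.contains (pvNm k) = false := hfresh k le_rfl
        have hins : (grid.insert (pvNm k) [v0, v3]).items = grid.items ++ [(pvNm k, [v0, v3])] :=
          PySem.Dict.items_insert_of_not_contains _ _ hnc
        by_cases hg : p3 + k + 1 < PySem.List.len combs
        · rw [if_neg (by omega), if_pos hg]
          have hfresh' : ∀ j : Int, k + 1 ≤ j →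
              (grid.insert (pvNm k) [v0, v3]).contains (pvNm j) = false := by
            intro j hj
            rw [PySem.Dict.contains_insert]
            have hne : (pvNm j == pvNm k) = false := by
              simp only [beq_eq_false_iff_ne, ne_eq]
              intro hc
              have := pvNm_inj _ _ hc
              omega
            rw [hne, hfresh j (by omega)]
            rfl
          rw [pvNm_def, ihf (k + 1) (grid.insert (pvNm k) [v0, v3]) hfresh', hins]
          simp
        · rw [if_pos (by omega), if_neg hg, pvNm_def, hins]
          simp

-- ===== VERDICT (by name: the statement is the Claim_ definition above) =====
theorem build_grid_spec : Claim_equal_build_grid := by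
  intro combs fsp rl _ hpre
  unfold Pre_build_grid at hpre
  unfold Spec_build_grid build_grid build_grid_alt
  by_cases h4 : PySem.List.len fsp ≥ 4
  · rw [if_pos h4]
    simp only [PySem.List.len] at h4
    set p0 := PySem.List.pyGetD fsp 0 0 with hp0
    set p3 := PySem.List.pyGetD fsp 3 0 with hp3
    have h0 : PySem.List.pyGet? fsp 0 = some (p0 + 0) := by
      rw [show p0 + 0 = p0 from by ring, hp0]
      exact pyGet?_eq_some_getD _ _ _ (by omega) (by omega)
    have h3 : PySem.List.pyGet? fsp 3 = some (p3 + 0) := by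
      rw [show p3 + 0 = p3 from by ring, hp3]
      exact pyGet?_eq_some_getD _ _ _ (by omega) (by omega)
    have hfresh0 : ∀ j : Int, (0:Int) ≤ j →
        (PySem.Dict.empty : PySem.Dict String (List Int)).contains (pvNm j) = false :=
      fun j _ => PySem.Dict.contains_empty _
    have hA := filler_items combs p0 p3 (2 * combs.length + 2) 0 fsp PySem.Dict.empty h0 h3 hfresh0
    rw [show pvNm 0 = "square0" from by decide, show (0:Int) + 1 = 1 from rfl] at hA
    have hB := alt_loop_items combs p0 p3 (2 * combs.length + 2) 0 PySem.Dict.empty hfresh0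
    have hgrids : build_grid_filler combs (2 * combs.length + 2) "square0" fsp 1 PySem.Dict.empty
        = build_grid_alt_loop combs p0 p3 (2 * combs.length + 2) 0 PySem.Dict.empty := by
      apply PySem.Dict.ext
      rw [hA, hB]
    rw [hgrids]
  · rw [if_neg h4]
    simp only [PySem.List.len, ge_iff_le, not_le] at h4
    have hfsp3 : PySem.List.pyGet? fsp 3 = none := by
      apply pyGet?_eq_none
      omega
    have hgrid : build_grid_filler combs (2 * combs.length + 2) "square0" fsp 1 PySem.Dict.empty
        = PySem.Dict.empty := by
      obtain ⟨F, hF⟩ : ∃ F, 2 * combs.length + 2 = F + 1 := ⟨2 * combs.length + 1, by omega⟩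
      rw [hF, build_grid_filler]
      cases h0 : PySem.List.pyGet? fsp 0 with
      | none => simp [h0]
      | some i0 =>
        simp only [h0]
        cases hc0 : PySem.List.pyGet? combs i0 with
        | none => simp [hc0]
        | some v0 => simp [hc0, hfsp3]
    rw [hgrid]
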